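-- pv_equiv track=rewrite | github.com/katayad/vpirod | 4/3/mat.py | reducefn
-- ===== SOURCE A (Python) =====
-- def reducefn(key, vals):
--     sm = 0
--     used = {}
--     for val in vals:
--         if val[0] in used:
--             sm += used[val[0]] * val[1]
--         else:
--             used[val[0]] = val[1]
--     return sm % 97
-- ===== SOURCE B (Python) =====
-- def reducefn(key, vals):
--     # Phase 1: index all values by key, in encounter order.
--     groups = {}
--     for k, v in vals:
--         groups[k] = groups.get(k, []) + [v]
--     # Phase 2: per key, first value times the sum of the later ones.
--     total = 0
--     for lst in groups.values():
--         if len(lst) >= 2: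
--             total += lst[0] * sum(lst[1:])
--     return total % 97
-- ===== Notes on version B (the rewrite author's own statement) =====
-- stated objective: alternative
-- what changed: Replaces A's single interleaved scan (running dict of first values, accumulating products on the fly) by a two-phase index-then-aggregate: first group all values by key, then sum first*sum(rest) per group.
import Mathlib
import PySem

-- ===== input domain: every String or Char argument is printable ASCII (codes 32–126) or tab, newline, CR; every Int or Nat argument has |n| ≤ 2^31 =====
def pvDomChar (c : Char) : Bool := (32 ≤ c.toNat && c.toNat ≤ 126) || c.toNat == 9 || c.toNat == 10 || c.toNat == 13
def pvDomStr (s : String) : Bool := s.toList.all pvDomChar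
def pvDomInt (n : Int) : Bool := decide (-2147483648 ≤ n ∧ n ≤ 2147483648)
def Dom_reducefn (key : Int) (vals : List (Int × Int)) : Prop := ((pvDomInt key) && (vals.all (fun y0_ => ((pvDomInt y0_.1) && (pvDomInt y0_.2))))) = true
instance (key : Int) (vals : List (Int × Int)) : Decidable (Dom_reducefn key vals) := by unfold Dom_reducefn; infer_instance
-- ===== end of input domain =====

-- B replaces A's single interleaved scan by a two-phase index-then-aggregate decomposition (group all values by key, then per group add first*sum(rest)); alternative structure, same cost.

-- ===== PORT A =====
-- one loop iteration of A: state (sm, used) updated by val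
def pvAStep (st : Int × PySem.Dict Int Int) (val : Int × Int) : Int × PySem.Dict Int Int :=
  if st.2.contains val.1 then (st.1 + st.2.getD val.1 0 * val.2, st.2)
  else (st.1, st.2.insert val.1 val.2)

def reducefn (key : Int) (vals : List (Int × Int)) : Int :=
  let st := vals.foldl pvAStep (0, PySem.Dict.empty)
  PySem.Int.mod st.1 97

-- ===== PORT B =====
def reducefn_alt (key : Int) (vals : List (Int × Int)) : Int :=
  let groups := vals.foldl (fun d p => d.modify p.1 [] (fun l => l ++ [p.2])) PySem.Dict.empty
  let total := (PySem.Dict.values groups).foldl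
    (fun t lst => if 2 ≤ PySem.List.len lst then t + PySem.List.pyGetD lst 0 0 * (PySem.List.slice lst (some 1) none).sum else t) 0
  PySem.Int.mod total 97

-- ===== PRECONDITION & SPEC =====
def Spec_reducefn (key : Int) (vals : List (Int × Int)) (out : Int) : Prop := out = reducefn_alt key vals
instance (key : Int) (vals : List (Int × Int)) (out : Int) : Decidable (Spec_reducefn key vals out) := by unfold Spec_reducefn; infer_instance

-- ===== CLAIM (what is proved, stated in full; the proofs are below) =====
def Claim_equal_reducefn : Prop := ∀ (key : Int) (vals : List (Int × Int)), Dom_reducefn key vals → Spec_reducefn key vals (reducefn key vals)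

-- ===== LEMMAS AND PROOFS =====
-- the per-group score B's second pass computes
def pvScore (lst : List Int) : Int :=
  if 2 ≤ PySem.List.len lst then PySem.List.pyGetD lst 0 0 * (PySem.List.slice lst (some 1) none).sum else 0

-- the values recorded under key k, in encounter order
def pvOcc (vals : List (Int × Int)) (k : Int) : List Int :=
  (vals.filter (fun p => p.1 == k)).map (·.2)

-- the common value of A's accumulator and B's total
def pvT (vals : List (Int × Int)) : Int :=
  ((PySem.Set.ofList (vals.map (·.1))).map (fun k => pvScore (pvOcc vals k))).sum

lemma pvScore_cons (f : Int) (rest : List Int) : pvScore (f :: rest) = f * rest.sum := by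
  cases rest with
  | nil => simp [pvScore, PySem.List.len_eq]
  | cons r rs =>
    rw [pvScore, if_pos (by simp [PySem.List.len_eq]; omega)]
    simp [PySem.List.slice_from_one, PySem.List.pyGetD_zero_cons]

lemma pvOcc_append (l : List (Int × Int)) (p : Int × Int) (k : Int) :
    pvOcc (l ++ [p]) k = pvOcc l k ++ (if p.1 = k then [p.2] else []) := by
  unfold pvOcc
  rw [List.filter_append, List.map_append]
  congr 1
  by_cases h : p.1 = k <;> simp [h]

lemma pvOcc_eq_nil_iff (l : List (Int × Int)) (k : Int) :
    pvOcc l k = [] ↔ k ∉ l.map (·.1) := by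
  simp [pvOcc, List.filter_eq_nil_iff]
  constructor
  · intro h q hq; exact h k q hq rfl
  · intro h a b hab e; subst e; exact h b hab

lemma pvOfList_append_mem (xs : List Int) (x : Int) (h : x ∈ xs) :
    PySem.Set.ofList (xs ++ [x]) = PySem.Set.ofList xs := by
  rw [PySem.Set.ofList_eq_foldl, List.foldl_append, ← PySem.Set.ofList_eq_foldl]
  simp [PySem.Set.add, PySem.Set.contains, h]

lemma pvOfList_append_not_mem (xs : List Int) (x : Int) (h : x ∉ xs) :
    PySem.Set.ofList (xs ++ [x]) = PySem.Set.ofList xs ++ [x] := by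
  rw [PySem.Set.ofList_eq_foldl, List.foldl_append, ← PySem.Set.ofList_eq_foldl]
  simp [PySem.Set.add, PySem.Set.contains, h]

lemma pvSum_update (K : List Int) (g g' : Int → Int) (x : Int) (hnd : K.Nodup) (hx : x ∈ K)
    (hagree : ∀ k ∈ K, k ≠ x → g' k = g k) :
    (K.map g').sum = (K.map g).sum + (g' x - g x) := by
  induction K with
  | nil => cases hx
  | cons a as ih =>
    simp only [List.map_cons, List.sum_cons]
    rcases List.mem_cons.mp hx with rfl | hxm
    · have hagree' : ∀ k ∈ as, g' k = g k := fun k hk =>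
        hagree k (List.mem_cons_of_mem _ hk) (fun e => (List.nodup_cons.mp hnd).1 (e ▸ hk))
      rw [List.map_congr_left hagree']
      ring
    · have ha : a ≠ x := fun e => (List.nodup_cons.mp hnd).1 (e ▸ hxm)
      rw [hagree a (List.mem_cons_self ..) ha,
        ih (List.nodup_cons.mp hnd).2 hxm (fun k hk hne => hagree k (List.mem_cons_of_mem _ hk) hne)]
      ring

lemma pvAinv (l : List (Int × Int)) :
    (∀ k, (l.foldl pvAStep (0, PySem.Dict.empty)).2.get? k = (pvOcc l k).head?) ∧
    (l.foldl pvAStep (0, PySem.Dict.empty)).1 = pvT l := by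
  induction l using List.reverseRecOn with
  | nil =>
    constructor
    · intro k; simp [pvOcc, PySem.Dict.get?_empty]
    · simp [pvT]
  | append_singleton l p ih =>
    obtain ⟨ihget, ihsum⟩ := ih
    rw [List.foldl_append] at *
    simp only [List.foldl_cons, List.foldl_nil]
    set st := l.foldl pvAStep (0, PySem.Dict.empty) with hst
    by_cases hc : st.2.contains p.1 = true
    · -- key already present
      have hsome : (st.2.get? p.1).isSome := by
        rw [← PySem.Dict.contains_eq_isSome_get?]; exact hc
      rw [ihget p.1] at hsome
      obtain ⟨f, rest, hocc⟩ : ∃ f rest, pvOcc l p.1 = f :: rest := by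
        cases h : pvOcc l p.1 with
        | nil => rw [h] at hsome; simp at hsome
        | cons a b => exact ⟨a, b, rfl⟩
      have hget : st.2.getD p.1 0 = f := by
        rw [PySem.Dict.getD_eq_get?_getD, ihget p.1, hocc]; rfl
      have hmem : p.1 ∈ l.map (·.1) := by
        by_contra hnm
        rw [← pvOcc_eq_nil_iff l p.1] at hnm
        rw [hnm] at hocc; cases hocc
      rw [pvAStep, if_pos hc]
      constructor
      · intro k
        rw [pvOcc_append]
        by_cases hk : k = p.1
        · subst hk
          rw [if_pos rfl, ihget, hocc]; rfl
        · rw [if_neg (fun e => hk e.symm), List.append_nil]; exact ihget k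
      · -- sum
        have hK : PySem.Set.ofList ((l ++ [p]).map (·.1)) = PySem.Set.ofList (l.map (·.1)) := by
          rw [List.map_append]; exact pvOfList_append_mem _ _ hmem
        rw [pvT, hK]
        rw [pvSum_update (PySem.Set.ofList (l.map (·.1)))
              (fun k => pvScore (pvOcc l k)) (fun k => pvScore (pvOcc (l ++ [p]) k)) p.1
              (PySem.Set.nodup_ofList _) ((PySem.Set.mem_ofList _ _).mpr hmem)
              (fun k _ hne => by show pvScore (pvOcc (l ++ [p]) k) = pvScore (pvOcc l k); rw [pvOcc_append, if_neg (fun e => hne e.symm), List.append_nil])]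
        rw [← pvT, ihsum]
        rw [pvOcc_append, if_pos rfl, hocc, hget]
        rw [List.cons_append, pvScore_cons, pvScore_cons, List.sum_append]
        simp; ring
    · -- new key
      have hnone : st.2.get? p.1 = none := by
        cases h : st.2.get? p.1 with
        | none => rfl
        | some v =>
          exact absurd (by rw [PySem.Dict.contains_eq_isSome_get?, h]; rfl) hc
      have hocc : pvOcc l p.1 = [] := by
        have := ihget p.1; rw [hnone] at this
        exact (List.head?_eq_none_iff).mp this.symm
      have hnm : p.1 ∉ l.map (·.1) := (pvOcc_eq_nil_iff l p.1).mp hocc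
      rw [pvAStep, if_neg hc]
      constructor
      · intro k
        rw [pvOcc_append, PySem.Dict.get?_insert]
        by_cases hk : k = p.1
        · subst hk
          rw [if_pos rfl, if_pos rfl, hocc]; rfl
        · rw [if_neg hk, if_neg (fun e => hk e.symm), List.append_nil]; exact ihget k
      · have hK : PySem.Set.ofList ((l ++ [p]).map (·.1))
            = PySem.Set.ofList (l.map (·.1)) ++ [p.1] := by
          rw [List.map_append]; exact pvOfList_append_not_mem _ _ hnm
        rw [pvT, hK, List.map_append, List.sum_append]
        have h1 : (PySem.Set.ofList (l.map (·.1))).map (fun k => pvScore (pvOcc (l ++ [p]) k))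
            = (PySem.Set.ofList (l.map (·.1))).map (fun k => pvScore (pvOcc l k)) := by
          apply List.map_congr_left
          intro k hk
          have hkne : p.1 ≠ k := fun e => hnm (e ▸ (PySem.Set.mem_ofList _ _).mp hk)
          rw [pvOcc_append, if_neg hkne, List.append_nil]
        rw [h1, ← pvT, ihsum]
        simp [pvOcc_append, hocc, pvScore_cons]

lemma pvFoldl_if (L : List (List Int)) (a : Int) :
    L.foldl (fun t lst => if 2 ≤ PySem.List.len lst then
        t + PySem.List.pyGetD lst 0 0 * (PySem.List.slice lst (some 1) none).sum else t) a
      = a + (L.map pvScore).sum := by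
  induction L generalizing a with
  | nil => simp
  | cons x xs ih =>
    simp only [List.foldl_cons, List.map_cons, List.sum_cons, ih, pvScore]
    split_ifs <;> ring

lemma pvB_total (vals : List (Int × Int)) :
    (PySem.Dict.values (vals.foldl (fun d p => d.modify p.1 [] (fun l => l ++ [p.2])) PySem.Dict.empty)).foldl
      (fun t lst => if 2 ≤ PySem.List.len lst then t + PySem.List.pyGetD lst 0 0 * (PySem.List.slice lst (some 1) none).sum else t) 0
    = pvT vals := by
  set d := vals.foldl (fun d p => d.modify p.1 [] (fun l => l ++ [p.2])) PySem.Dict.empty with hd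
  have hkeys : d.keys = PySem.Set.ofList (vals.map (·.1)) := by
    rw [hd, PySem.Dict.keys_foldl_modify_key]
    simp [PySem.Dict.keys_empty, PySem.Set.update, PySem.Set.ofList_eq_foldl]
  have hnd : d.keys.Nodup := by
    rw [hd]
    exact PySem.Dict.nodup_keys_foldl_modify_key _ _ _ _ _ (by simp)
  have hgetD : ∀ k, d.getD k [] = pvOcc vals k := by
    intro k
    rw [hd, PySem.Dict.getD_foldl_modify_append, PySem.Dict.getD_empty]
    simp [pvOcc]
  have hvals : d.values = d.keys.map (fun k => d.getD k []) := PySem.Dict.values_eq_map_keys d hnd []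
  rw [hvals, pvFoldl_if, hkeys, zero_add, pvT, List.map_map]
  exact congrArg List.sum (List.map_congr_left (fun k _ => by simp [Function.comp, hgetD k]))

-- ===== VERDICT (by name: the statement is the Claim_ definition above) =====
theorem reducefn_spec : Claim_equal_reducefn := by
  intro key vals _
  unfold Spec_reducefn
  exact congrArg (fun t => PySem.Int.mod t 97) ((pvAinv vals).2.trans (pvB_total vals).symm)
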